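-- pv_equiv track=rewrite | github.com/asviswesh/protein_fitness_prediction | convergence_20ns_final.py | get_distinct_residues
-- ===== SOURCE A (Python) =====
-- def get_distinct_residues(sequence_string):
--     res_dict = {}
--     for res_index in range(len(sequence_string)):
--         found_res_already = False
--         if sequence_string[res_index] in res_dict:
--             found_res_already = True
--         if not found_res_already:
--             res_dict.update({sequence_string[res_index]: (res_index + 1)})
--     return list(res_dict.values())
-- ===== SOURCE B (Python) =====
-- def get_distinct_residues(sequence_string):
--     return sorted(sequence_string.index(ch) + 1 for ch in set(sequence_string))
-- ===== Notes on version B (the rewrite author's own statement) =====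
-- stated objective: alternative
-- what changed: Drops A's order-preserving dict-building pass entirely: B takes the unordered set of characters, maps each to its first-occurrence index+1 via str.index, and recovers the output order by sorting (correct because first-occurrence positions are exactly A's values and A emits them in increasing order).
import Mathlib
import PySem

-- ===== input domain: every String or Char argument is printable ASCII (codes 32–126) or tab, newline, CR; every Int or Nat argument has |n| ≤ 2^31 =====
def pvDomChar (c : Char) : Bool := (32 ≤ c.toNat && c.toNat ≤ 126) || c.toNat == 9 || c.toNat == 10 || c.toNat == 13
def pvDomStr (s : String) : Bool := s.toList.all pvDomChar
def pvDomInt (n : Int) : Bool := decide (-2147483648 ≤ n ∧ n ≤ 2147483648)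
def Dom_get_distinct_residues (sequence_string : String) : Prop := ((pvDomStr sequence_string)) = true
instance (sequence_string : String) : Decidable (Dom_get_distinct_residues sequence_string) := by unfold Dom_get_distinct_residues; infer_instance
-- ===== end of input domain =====

-- B replaces A's order-preserving dict pass by: unordered set of characters, str.index(ch)+1
-- for each, then sort (first-occurrence positions are increasing in appearance order).

-- ===== PORT A =====
-- A: one pass over the indices, conditionally growing a dict char -> index+1, then its values.
-- s[res_index] is ported as pyGetD at the index with an arbitrary default: every index drawn
-- from range(len(s)) is in range, so the default is never read and the port is exact.
def get_distinct_residues (sequence_string : String) : List Int :=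
  let cs := sequence_string.toList
  ((PySem.List.pyRange 0 (PySem.Str.len sequence_string) 1).foldl
    (fun (d : PySem.Dict Char Int) res_index =>
      let found_res_already := d.contains (PySem.List.pyGetD cs res_index ' ')
      if !found_res_already then
        d.insert (PySem.List.pyGetD cs res_index ' ') (res_index + 1)
      else d)
    PySem.Dict.empty).values

-- ===== PORT B =====
-- B: set(s) = PySem.Set.ofList, each ch mapped to s.index(ch)+1 (index? is always some
-- because ch is a member of the string, so the getD default is never read), then sorted.
def get_distinct_residues_alt (sequence_string : String) : List Int :=
  PySem.List.sorted
    ((PySem.Set.ofList sequence_string.toList).map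
      (fun ch => (((PySem.List.index? sequence_string.toList ch).getD 0 : Nat) : Int) + 1))
    (fun x => x) false

-- ===== PRECONDITION & SPEC =====
def Spec_get_distinct_residues (sequence_string : String) (out : List Int) : Prop := out = get_distinct_residues_alt sequence_string
instance (sequence_string : String) (out : List Int) : Decidable (Spec_get_distinct_residues sequence_string out) := by unfold Spec_get_distinct_residues; infer_instance

-- ===== CLAIM (what is proved, stated in full; the proofs are below) =====
def Claim_equal_get_distinct_residues : Prop := ∀ (sequence_string : String), Dom_get_distinct_residues sequence_string → Spec_get_distinct_residues sequence_string (get_distinct_residues sequence_string)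

-- ===== LEMMAS AND PROOFS =====

-- A's loop body, expressed over (index, character) pairs.
def pvStep (d : PySem.Dict Char Int) (p : Int × Char) : PySem.Dict Char Int :=
  if !(d.contains p.2) then d.insert p.2 (p.1 + 1) else d

-- dedup of l ++ [c]: c is appended iff it is new.
lemma dedup_append_singleton (l : List Char) (c : Char) :
    PySem.List.dedup (l ++ [c]) =
      if c ∈ l then PySem.List.dedup l else PySem.List.dedup l ++ [c] := by
  simp only [PySem.List.dedup_eq_ofList, PySem.Set.ofList_eq_foldl, List.foldl_append,
    List.foldl_cons, List.foldl_nil, PySem.Set.add]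
  rw [← PySem.Set.ofList_eq_foldl]
  by_cases h : c ∈ l
  · simp [h]
  · simp [h]

-- Invariant of A's loop: after processing enumerate l, the dict's items are exactly the
-- distinct characters of l in first-appearance order, each paired with first index + 1.
lemma loop_items (l : List Char) :
    ((PySem.List.enumerate l 0).foldl pvStep PySem.Dict.empty).items =
      (PySem.List.dedup l).map
        (fun c => (c, (((PySem.List.index? l c).getD 0 : Nat) : Int) + 1)) := by
  induction l using List.reverseRecOn with
  | nil => rfl
  | append_singleton t c ih =>
    rw [PySem.List.enumerate_append, List.foldl_append]
    have hkeys : ((PySem.List.enumerate t 0).foldl pvStep PySem.Dict.empty).keys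
        = PySem.List.dedup t := by
      simp [PySem.Dict.keys, ih, Function.comp_def]
    have hmem : ∀ x, ((PySem.List.enumerate t 0).foldl pvStep PySem.Dict.empty).contains x = true ↔ x ∈ t := by
      intro x
      rw [PySem.Dict.contains_iff_mem_keys, hkeys, PySem.List.mem_dedup]
    rw [dedup_append_singleton]
    by_cases hm : c ∈ t
    · rw [if_pos hm]
      have hcont : ((PySem.List.enumerate t 0).foldl pvStep PySem.Dict.empty).contains c = true :=
        (hmem c).mpr hm
      simp only [PySem.List.enumerate, List.foldl_cons, List.foldl_nil, pvStep, hcont,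
        Bool.not_true, Bool.false_eq_true, if_false]
      rw [ih]
      apply List.map_congr_left
      intro x hx
      rw [PySem.List.index?_append_of_mem [c] ((PySem.List.mem_dedup t x).mp hx)]
    · rw [if_neg hm]
      have hcont : ((PySem.List.enumerate t 0).foldl pvStep PySem.Dict.empty).contains c = false := by
        rw [Bool.eq_false_iff]; intro h; exact hm ((hmem c).mp h)
      simp only [PySem.List.enumerate, List.foldl_cons, List.foldl_nil, pvStep, hcont,
        Bool.not_false, if_true]
      rw [PySem.Dict.items_insert_of_not_contains _ _ hcont, ih, List.map_append]
      congr 1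
      · apply List.map_congr_left
        intro x hx
        rw [PySem.List.index?_append_of_mem [c] ((PySem.List.mem_dedup t x).mp hx)]
      · rw [List.map_cons, List.map_nil, PySem.List.index?_append_singleton_self t c hm]
        norm_num

-- The first-occurrence positions of the distinct characters, in appearance order, are
-- strictly increasing.
lemma pairwise_index_dedup (l : List Char) :
    (PySem.List.dedup l).Pairwise
      (fun a b => ((PySem.List.index? l a).getD 0 : Nat) < (PySem.List.index? l b).getD 0) := by
  induction l using List.reverseRecOn with
  | nil => simp [PySem.List.dedup]
  | append_singleton t c ih =>
    rw [dedup_append_singleton]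
    by_cases hm : c ∈ t
    · rw [if_pos hm]
      refine ih.imp_of_mem ?_
      intro a b ha hb hab
      rwa [PySem.List.index?_append_of_mem [c] ((PySem.List.mem_dedup t a).mp ha),
        PySem.List.index?_append_of_mem [c] ((PySem.List.mem_dedup t b).mp hb)]
    · rw [if_neg hm]
      rw [List.pairwise_append]
      refine ⟨?_, List.pairwise_singleton _ _, ?_⟩
      · refine ih.imp_of_mem ?_
        intro a b ha hb hab
        rwa [PySem.List.index?_append_of_mem [c] ((PySem.List.mem_dedup t a).mp ha),
          PySem.List.index?_append_of_mem [c] ((PySem.List.mem_dedup t b).mp hb)]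
      · intro a ha b hb
        rw [List.mem_singleton] at hb
        rw [hb]
        have hat : a ∈ t := (PySem.List.mem_dedup t a).mp ha
        rw [PySem.List.index?_append_of_mem [c] hat,
          PySem.List.index?_append_singleton_self t c hm]
        obtain ⟨k, hk⟩ := Option.isSome_iff_exists.mp
          ((PySem.List.index?_isSome_iff t a).mpr hat)
        obtain ⟨hlt, _, _⟩ := PySem.List.getElem_of_index?_eq_some hk
        simp only [PySem.List.index?_eq_idxOf?] at hk
        simp [hk, hlt]

-- ===== VERDICT (by name: the statement is the Claim_ definition above) =====
theorem get_distinct_residues_spec : Claim_equal_get_distinct_residues := by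
  intro s _
  unfold Spec_get_distinct_residues get_distinct_residues get_distinct_residues_alt
  have hfold : (PySem.List.pyRange 0 (PySem.Str.len s) 1).foldl
      (fun (d : PySem.Dict Char Int) res_index =>
        let found_res_already := d.contains (PySem.List.pyGetD s.toList res_index ' ')
        if !found_res_already then
          d.insert (PySem.List.pyGetD s.toList res_index ' ') (res_index + 1)
        else d)
      PySem.Dict.empty
      = (PySem.List.enumerate s.toList 0).foldl pvStep PySem.Dict.empty := by
    rw [PySem.List.enumerate_eq_map_pyRange s.toList ' ', List.foldl_map]
    simp [pvStep, PySem.Str.len_eq, PySem.List.len]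
  simp only []
  rw [hfold]
  show ((PySem.List.enumerate s.toList 0).foldl pvStep PySem.Dict.empty).items.map (·.2) = _
  rw [loop_items, List.map_map]
  rw [← PySem.List.dedup_eq_ofList]
  rw [PySem.List.sorted_eq_self_of_pairwise]
  · simp [Function.comp_def]
  · rw [List.pairwise_map]
    refine (pairwise_index_dedup s.toList).imp ?_
    intro a b hab
    omega
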